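-- pv_equiv track=rewrite | github.com/bert-berkers/UrbanRepML | scripts/one_off/extract_pois_from_history.py | _node_matches_filter
-- ===== SOURCE A (Python) =====
-- def _node_matches_filter(tags: dict, tag_lookup: dict) -> bool:
--     """Check if a node's tags match any of the POI filter criteria."""
--     for key, value in tags.items():
--         if key in tag_lookup:
--             allowed = tag_lookup[key]
--             if allowed is None:
--                 # Accept any value
--                 return True
--             if value in allowed:
--                 return True
--     return False
-- ===== SOURCE B (Python) =====
-- def _node_matches_filter(tags: dict, tag_lookup: dict) -> bool:
--     """Check if a node's tags match any of the POI filter criteria.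
--
--     Different strategy: flatten the filter table into two precomputed sets —
--     the wildcard keys (allowed is None) and the flat set of concrete
--     (key, value) pairs — then test the node with two set operations."""
--     wildcard = {k for k, allowed in tag_lookup.items() if allowed is None}
--     pairs = {(k, v) for k, allowed in tag_lookup.items()
--              if allowed is not None for v in allowed}
--     if not wildcard.isdisjoint(tags.keys()):
--         return True
--     return any(kv in pairs for kv in tags.items())
-- ===== Notes on version B (the rewrite author's own statement) =====
-- stated objective: alternative
-- what changed: B flattens the filter table into a wildcard-key set and a flat set of concrete (key, value) pairs, then answers with a set-disjointness test on the node's keys plus a pair-membership pass over the node's items, replacing A's per-tag dict lookup and inner 'value in allowed' scan.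
import Mathlib
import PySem

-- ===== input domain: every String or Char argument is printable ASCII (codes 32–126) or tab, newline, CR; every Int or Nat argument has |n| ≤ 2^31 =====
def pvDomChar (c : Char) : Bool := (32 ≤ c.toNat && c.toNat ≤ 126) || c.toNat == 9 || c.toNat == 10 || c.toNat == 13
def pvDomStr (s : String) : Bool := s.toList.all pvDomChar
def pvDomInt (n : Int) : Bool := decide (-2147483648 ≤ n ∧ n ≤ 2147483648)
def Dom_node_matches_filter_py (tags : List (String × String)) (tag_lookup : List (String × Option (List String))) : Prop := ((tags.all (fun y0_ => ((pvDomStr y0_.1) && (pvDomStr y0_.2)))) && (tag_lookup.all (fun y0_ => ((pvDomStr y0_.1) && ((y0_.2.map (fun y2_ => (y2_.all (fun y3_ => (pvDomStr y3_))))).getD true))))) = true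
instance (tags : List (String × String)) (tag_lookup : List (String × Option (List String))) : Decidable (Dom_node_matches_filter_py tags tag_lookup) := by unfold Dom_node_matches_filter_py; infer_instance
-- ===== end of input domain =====

-- B flattens the filter table into a wildcard-key set plus a flat (key, value) pair set and
-- answers by a disjointness test and a pair-membership pass (alternative algorithm, same result).


-- ===== PORT A =====
-- for each (key, value) of tags: if key in tag_lookup, allowed = tag_lookup[key];
-- allowed is None → True; value in allowed → True; else next tag.  Dict membership/
-- lookup on the association list is first-match lookup (List.lookup).
def node_matches_filter_py (tags : List (String × String)) (tag_lookup : List (String × Option (List String))) : Bool :=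
  match tags with
  | [] => false
  | (key, value) :: rest =>
    match tag_lookup.lookup key with
    | some allowed =>
      match allowed with
      | none => true
      | some lst => if lst.contains value then true else node_matches_filter_py rest tag_lookup
    | none => node_matches_filter_py rest tag_lookup

-- ===== PORT B =====
-- wildcard = {k for k, allowed in tag_lookup.items() if allowed is None}
def nodeWildcard (tag_lookup : List (String × Option (List String))) : PySem.Set String :=
  PySem.Set.ofList ((tag_lookup.filter (fun p => p.2.isNone)).map Prod.fst)

-- pairs = {(k, v) for k, allowed in tag_lookup.items() if allowed is not None for v in allowed}
def nodePairs (tag_lookup : List (String × Option (List String))) : PySem.Set (String × String) :=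
  PySem.Set.ofList (tag_lookup.flatMap (fun p =>
    match p.2 with | none => [] | some lst => lst.map (fun v => (p.1, v))))

-- if not wildcard.isdisjoint(tags.keys()): return True
-- return any(kv in pairs for kv in tags.items())
def node_matches_filter_py_alt (tags : List (String × String)) (tag_lookup : List (String × Option (List String))) : Bool :=
  let wildcard := nodeWildcard tag_lookup
  let pairs := nodePairs tag_lookup
  if !(PySem.Set.isdisjoint wildcard (tags.map Prod.fst)) then true
  else tags.any (fun kv => PySem.Set.contains pairs kv)

-- ===== PRECONDITION & SPEC =====
-- Pre_ excludes association lists whose tag_lookup has duplicate keys: both parameters are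
-- Python dicts, whose association-list representation always has distinct keys, so no Python
-- input is excluded.
def Pre_node_matches_filter_py (tags : List (String × String)) (tag_lookup : List (String × Option (List String))) : Prop :=
  (tag_lookup.map Prod.fst).Nodup
instance (tags : List (String × String)) (tag_lookup : List (String × Option (List String))) : Decidable (Pre_node_matches_filter_py tags tag_lookup) := by unfold Pre_node_matches_filter_py; infer_instance

def pvWitness_node_matches_filter_py : (List (String × String)) × (List (String × Option (List String))) :=
  ([("amenity", "cafe"), ("name", "Joe")], [("amenity", some ["cafe", "bar"]), ("tourism", none)])

def Spec_node_matches_filter_py (tags : List (String × String)) (tag_lookup : List (String × Option (List String))) (out : Bool) : Prop := out = node_matches_filter_py_alt tags tag_lookup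
instance (tags : List (String × String)) (tag_lookup : List (String × Option (List String))) (out : Bool) : Decidable (Spec_node_matches_filter_py tags tag_lookup out) := by unfold Spec_node_matches_filter_py; infer_instance

-- ===== CLAIM =====
def Claim_equal_node_matches_filter_py : Prop := ∀ (tags : List (String × String)) (tag_lookup : List (String × Option (List String))), Dom_node_matches_filter_py tags tag_lookup → Pre_node_matches_filter_py tags tag_lookup → Spec_node_matches_filter_py tags tag_lookup (node_matches_filter_py tags tag_lookup)

-- ===== LEMMAS AND PROOFS =====

-- whether a value passes a filter entry
def pvOk (allowed : Option (List String)) (v : String) : Bool :=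
  match allowed with | none => true | some lst => lst.contains v

theorem lookup_some_mem {α : Type} {l : List (String × α)} {k : String} {v : α}
    (h : l.lookup k = some v) : (k, v) ∈ l := by
  induction l with
  | nil => simp [List.lookup] at h
  | cons p t ih =>
    obtain ⟨k', v'⟩ := p
    simp only [List.lookup] at h
    cases hk : (k == k') with
    | true =>
      simp only [hk] at h
      obtain rfl := eq_of_beq hk
      obtain rfl := Option.some.inj h
      simp
    | false =>
      simp only [hk] at h
      exact List.mem_cons_of_mem _ (ih h)

theorem mem_lookup_of_nodup {α : Type} {l : List (String × α)} {k : String} {v : α}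
    (hnd : (l.map Prod.fst).Nodup) (h : (k, v) ∈ l) : l.lookup k = some v := by
  induction l with
  | nil => simp at h
  | cons p t ih =>
    obtain ⟨k', v'⟩ := p
    simp only [List.map_cons, List.nodup_cons] at hnd
    cases hk : (k == k') with
    | true =>
      obtain rfl := eq_of_beq hk
      simp only [List.lookup, hk]
      rcases List.mem_cons.mp h with h1 | h1
      · injection h1 with _ hb
        rw [hb]
      · exact absurd (List.mem_map.mpr ⟨(k, v), h1, rfl⟩) hnd.1
    | false =>
      have hne : k ≠ k' := fun e => by simp [e] at hk
      simp only [List.lookup, hk]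
      rcases List.mem_cons.mp h with h1 | h1
      · injection h1 with ha _
        exact absurd ha hne
      · exact ih hnd.2 h1

-- A returns true iff some tag matches some filter entry (via first-match lookup)
theorem a_iff (tags : List (String × String)) (tl : List (String × Option (List String))) :
    node_matches_filter_py tags tl = true ↔
      ∃ p ∈ tags, ∃ al, tl.lookup p.1 = some al ∧ pvOk al p.2 = true := by
  induction tags with
  | nil => simp [node_matches_filter_py]
  | cons p rest ih =>
    obtain ⟨key, value⟩ := p
    simp only [node_matches_filter_py]
    cases hlk : tl.lookup key with
    | none =>
      rw [ih]
      constructor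
      · rintro ⟨q, hq, al, h1, h2⟩; exact ⟨q, List.mem_cons_of_mem _ hq, al, h1, h2⟩
      · rintro ⟨q, hq, al, h1, h2⟩
        rcases List.mem_cons.mp hq with rfl | hq'
        · rw [hlk] at h1; exact absurd h1 (by simp)
        · exact ⟨q, hq', al, h1, h2⟩
    | some al =>
      cases al with
      | none =>
        simp only [true_iff]
        exact ⟨(key, value), List.mem_cons_self, none, hlk, rfl⟩
      | some lst =>
        dsimp only
        by_cases hc : lst.contains value = true
        · rw [if_pos hc]
          simp only [true_iff]
          exact ⟨(key, value), List.mem_cons_self, some lst, hlk, hc⟩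
        · rw [if_neg hc, ih]
          constructor
          · rintro ⟨q, hq, al, h1, h2⟩; exact ⟨q, List.mem_cons_of_mem _ hq, al, h1, h2⟩
          · rintro ⟨q, hq, al, h1, h2⟩
            rcases List.mem_cons.mp hq with rfl | hq'
            · rw [hlk] at h1
              obtain rfl := Option.some.inj h1
              exact absurd h2 (by simpa [pvOk] using hc)
            · exact ⟨q, hq', al, h1, h2⟩

theorem mem_wildcard (tl : List (String × Option (List String))) (k : String) :
    k ∈ nodeWildcard tl ↔ (k, none) ∈ tl := by
  unfold nodeWildcard
  rw [PySem.Set.mem_ofList]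
  simp only [List.mem_map, List.mem_filter]
  constructor
  · rintro ⟨⟨k', al⟩, ⟨hm, hn⟩, rfl⟩
    cases al with
    | none => exact hm
    | some _ => simp at hn
  · intro h; exact ⟨(k, none), ⟨h, rfl⟩, rfl⟩

theorem mem_pairs (tl : List (String × Option (List String))) (k v : String) :
    (k, v) ∈ nodePairs tl ↔ ∃ lst, (k, some lst) ∈ tl ∧ v ∈ lst := by
  unfold nodePairs
  rw [PySem.Set.mem_ofList]
  simp only [List.mem_flatMap]
  constructor
  · rintro ⟨⟨p', al⟩, hm, hv⟩
    cases al with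
    | none => simp at hv
    | some lst =>
      simp only [List.mem_map] at hv
      obtain ⟨v', hv', he⟩ := hv
      have h1 : p' = k := congrArg Prod.fst he
      have h2 : v' = v := congrArg Prod.snd he
      subst h1; subst h2
      exact ⟨lst, hm, hv'⟩
  · rintro ⟨lst, hm, hv⟩
    exact ⟨(k, some lst), hm, by simp only [List.mem_map]; exact ⟨v, hv, rfl⟩⟩

-- ===== VERDICT =====
theorem node_matches_filter_py_spec : Claim_equal_node_matches_filter_py := by
  intro tags tl _ hnd
  unfold Spec_node_matches_filter_py node_matches_filter_py_alt
  by_cases hd : PySem.Set.isdisjoint (nodeWildcard tl) (tags.map Prod.fst) = true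
  · simp only [hd, Bool.not_true, Bool.false_eq_true, if_false]
    rw [Bool.eq_iff_iff, a_iff]
    simp only [List.any_eq_true]
    constructor
    · rintro ⟨⟨k, v⟩, hm, al, hlk, hok⟩
      have hmem := lookup_some_mem hlk
      cases al with
      | none =>
        exact absurd (List.mem_map.mpr ⟨(k, v), hm, rfl⟩)
          ((PySem.Set.isdisjoint_iff ..).mp hd k ((mem_wildcard tl k).mpr hmem))
      | some lst =>
        refine ⟨(k, v), hm, ?_⟩
        rw [PySem.Set.contains_iff, mem_pairs]
        exact ⟨lst, hmem, by simpa [pvOk] using hok⟩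
    · rintro ⟨⟨k, v⟩, hm, hc⟩
      rw [PySem.Set.contains_iff, mem_pairs] at hc
      obtain ⟨lst, hmem, hv⟩ := hc
      exact ⟨(k, v), hm, some lst, mem_lookup_of_nodup hnd hmem, by simp [pvOk, hv]⟩
  · have hneg : ¬ ∀ x ∈ nodeWildcard tl, x ∉ tags.map Prod.fst := fun h =>
      hd ((PySem.Set.isdisjoint_iff ..).mpr h)
    rw [Bool.not_eq_true] at hd
    simp only [hd, Bool.not_false, if_true]
    rw [a_iff]
    simp only [not_forall] at hneg
    obtain ⟨k, hkw, hkt⟩ := hneg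
    rw [not_not] at hkt
    obtain ⟨⟨k', v⟩, hm, rfl⟩ := List.mem_map.mp hkt
    exact ⟨(k', v), hm, none, mem_lookup_of_nodup hnd ((mem_wildcard tl (k', v).1).mp hkw), rfl⟩
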